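-- pv_equiv track=rewrite | github.com/katimlam/River-Tests | River_Test_4_Three_Jealous_Husbands.py | check_if_ok
-- ===== SOURCE A (Python) =====
-- def last_num(str):
--     return str[-1]
--
-- def check_if_ok(new_start, new_end):
--     for wife in new_start:
--         if "Wife" in wife:
--             for husband in new_start:
--                 if "Husband" in husband and last_num(husband)==last_num(wife):
--                     break
--             else:
--                 for other_husband in new_start:
--                     if "Husband" in other_husband:
--                         return False
--     for wife in new_end:
--         if "Wife" in wife:
--             for husband in new_end:
--                 if "Husband" in husband and last_num(husband)==last_num(wife):
--                     break
--             else: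
--                 for other_husband in new_end:
--                     if "Husband" in other_husband:
--                         return False
--     return True
-- ===== SOURCE B (Python) =====
-- def check_if_ok(new_start, new_end):
--     def bank_ok(bank):
--         husbands = {name[-1] for name in bank if "Husband" in name}
--         wives = {name[-1] for name in bank if "Wife" in name}
--         return not husbands or wives <= husbands
--     return bank_ok(new_start) and bank_ok(new_end)
-- ===== Notes on version B (the rewrite author's own statement) =====
-- stated objective: simpler
-- what changed: Replaces A's nested for/else existence scans with early returns by, per bank, building the set of husbands' and wives' last characters once and testing 'no husbands or wives-set is a subset of husbands-set'.
import Mathlib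
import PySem

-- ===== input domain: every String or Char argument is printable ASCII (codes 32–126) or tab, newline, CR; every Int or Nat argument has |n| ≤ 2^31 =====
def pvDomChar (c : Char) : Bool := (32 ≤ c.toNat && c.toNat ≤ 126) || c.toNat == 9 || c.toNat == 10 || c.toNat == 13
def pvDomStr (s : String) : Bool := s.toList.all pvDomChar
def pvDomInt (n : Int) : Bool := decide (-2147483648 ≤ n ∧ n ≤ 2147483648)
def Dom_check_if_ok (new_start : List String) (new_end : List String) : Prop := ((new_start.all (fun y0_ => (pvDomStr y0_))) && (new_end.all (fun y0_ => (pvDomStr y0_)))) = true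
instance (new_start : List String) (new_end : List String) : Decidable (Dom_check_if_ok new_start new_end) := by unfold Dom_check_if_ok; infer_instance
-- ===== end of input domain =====

-- B replaces A's nested for/else existence scans by per-bank set builds and a subset test (objective: simpler).

-- ===== PORT A =====
-- last_num(str) = str[-1]; IndexError is unreachable because it is only applied to
-- strings containing "Wife" or "Husband"; ported as the Option-valued pyGet?.
def last_num (s : String) : Option Char := PySem.Str.pyGet? s (-1)

-- the outer 'for wife in bank: …' loop with its early 'return False'; `bank` stays fixed
def goA (bank : List String) : List String → Bool
  | [] => true
  | w :: rest =>
    if PySem.Str.isIn "Wife" w then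
      -- inner for/break = existence scan; for/else branch = another scan with early return
      if bank.any (fun h => PySem.Str.isIn "Husband" h && last_num h == last_num w) then
        goA bank rest
      else if bank.any (fun h => PySem.Str.isIn "Husband" h) then false
      else goA bank rest
    else goA bank rest

def check_if_ok (new_start : List String) (new_end : List String) : Bool :=
  if goA new_start new_start then goA new_end new_end else false

-- ===== PORT B =====
def bank_ok (bank : List String) : Bool :=
  let husbands : PySem.Set (Option Char) :=
    PySem.Set.ofList ((bank.filter (fun n => PySem.Str.isIn "Husband" n)).map (fun n => PySem.Str.pyGet? n (-1)))
  let wives : PySem.Set (Option Char) :=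
    PySem.Set.ofList ((bank.filter (fun n => PySem.Str.isIn "Wife" n)).map (fun n => PySem.Str.pyGet? n (-1)))
  (PySem.Set.len husbands == 0) || PySem.Set.issubset wives husbands

def check_if_ok_alt (new_start : List String) (new_end : List String) : Bool :=
  bank_ok new_start && bank_ok new_end

-- ===== PRECONDITION & SPEC =====
def Spec_check_if_ok (new_start : List String) (new_end : List String) (out : Bool) : Prop := out = check_if_ok_alt new_start new_end
instance (new_start : List String) (new_end : List String) (out : Bool) : Decidable (Spec_check_if_ok new_start new_end out) := by unfold Spec_check_if_ok; infer_instance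

-- ===== CLAIM (what is proved, stated in full; the proofs are below) =====
def Claim_equal_check_if_ok : Prop := ∀ (new_start : List String) (new_end : List String), Dom_check_if_ok new_start new_end → Spec_check_if_ok new_start new_end (check_if_ok new_start new_end)

-- ===== LEMMAS AND PROOFS =====

-- characterisation of A's outer loop as a boolean formula
theorem goA_eq (bank ws : List String) :
    goA bank ws =
      !((bank.any (fun h => PySem.Str.isIn "Husband" h)) &&
        ws.any (fun w => PySem.Str.isIn "Wife" w &&
          !(bank.any (fun h => PySem.Str.isIn "Husband" h && last_num h == last_num w)))) := by
  induction ws with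
  | nil => simp [goA]
  | cons w rest ih =>
    rw [goA, List.any_cons]
    cases hw : PySem.Str.isIn "Wife" w <;>
      cases hm : bank.any (fun h => PySem.Str.isIn "Husband" h && last_num h == last_num w) <;>
        cases hh : bank.any (fun h => PySem.Str.isIn "Husband" h) <;>
          simp only [hw, hm, hh, ih] <;> simp

-- B's bank_ok equals the same boolean formula with ws = bank
theorem bank_ok_eq (bank : List String) :
    bank_ok bank =
      !((bank.any (fun h => PySem.Str.isIn "Husband" h)) &&
        bank.any (fun w => PySem.Str.isIn "Wife" w &&
          !(bank.any (fun h => PySem.Str.isIn "Husband" h && last_num h == last_num w)))) := by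
  simp only [bank_ok, last_num]
  by_cases hh : bank.any (fun h => PySem.Str.isIn "Husband" h)
  · have hlen : (PySem.Set.len (PySem.Set.ofList ((bank.filter (fun n => PySem.Str.isIn "Husband" n)).map (fun n => PySem.Str.pyGet? n (-1)))) == 0) = false := by
      rcases List.any_eq_true.mp hh with ⟨h, hmem, hhus⟩
      have hmemH : PySem.Str.pyGet? h (-1) ∈ PySem.Set.ofList ((bank.filter (fun n => PySem.Str.isIn "Husband" n)).map (fun n => PySem.Str.pyGet? n (-1))) :=
        (PySem.Set.mem_ofList _ _).mpr (List.mem_map_of_mem (List.mem_filter.mpr ⟨hmem, hhus⟩))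
      have hpos := List.length_pos_of_mem hmemH
      simp only [PySem.Set.len, beq_eq_false_iff_ne, ne_eq]
      intro h0
      omega
    simp only [hlen, hh, Bool.false_or, Bool.true_and]
    -- issubset ↔ no unmatched wife
    by_cases hb : bank.any (fun w => PySem.Str.isIn "Wife" w && !(bank.any (fun h => PySem.Str.isIn "Husband" h && PySem.Str.pyGet? h (-1) == PySem.Str.pyGet? w (-1))))
    · simp only [hb, Bool.not_true]
      rcases List.any_eq_true.mp hb with ⟨w, hwmem, hw⟩
      simp only [Bool.and_eq_true, Bool.not_eq_true'] at hw
      apply Bool.eq_false_iff.mpr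
      intro hsub
      have hsub' := (PySem.Set.issubset_iff _ _).mp hsub
      have hwmem' : PySem.Str.pyGet? w (-1) ∈ PySem.Set.ofList ((bank.filter (fun n => PySem.Str.isIn "Wife" n)).map (fun n => PySem.Str.pyGet? n (-1))) := by
        rw [PySem.Set.mem_ofList _ _]
        exact List.mem_map_of_mem (List.mem_filter.mpr ⟨hwmem, hw.1⟩)
      have := hsub' _ hwmem'
      rw [PySem.Set.mem_ofList _ _] at this
      rcases List.mem_map.mp this with ⟨h, hhm, hhe⟩
      rcases List.mem_filter.mp hhm with ⟨hhmem, hhus⟩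
      have : bank.any (fun h => PySem.Str.isIn "Husband" h && PySem.Str.pyGet? h (-1) == PySem.Str.pyGet? w (-1)) = true :=
        List.any_eq_true.mpr ⟨h, hhmem, by simp only [Bool.and_eq_true, beq_iff_eq]; exact ⟨hhus, hhe⟩⟩
      rw [hw.2] at this; exact absurd this (by simp)
    · simp only [hb, Bool.not_false]
      apply (PySem.Set.issubset_iff _ _).mpr
      intro c hc
      rw [PySem.Set.mem_ofList _ _] at hc
      rcases List.mem_map.mp hc with ⟨w, hwm, hwe⟩
      rcases List.mem_filter.mp hwm with ⟨hwmem, hwife⟩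
      have hnb := List.any_eq_false.mp (Bool.eq_false_iff.mpr hb) w hwmem
      simp only [Bool.not_eq_true, hwife, Bool.true_and, Bool.not_eq_false'] at hnb
      rcases List.any_eq_true.mp hnb with ⟨h, hhmem, hh2⟩
      simp only [Bool.and_eq_true, beq_iff_eq] at hh2
      rw [PySem.Set.mem_ofList _ _]
      exact List.mem_map.mpr ⟨h, List.mem_filter.mpr ⟨hhmem, hh2.1⟩, by rw [hh2.2, hwe]⟩
  · -- no husband on the bank: both sides are true
    have hbf : (bank.any fun h => PySem.Str.isIn "Husband" h) = false := Bool.eq_false_iff.mpr hh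
    have hfil : bank.filter (fun n => PySem.Str.isIn "Husband" n) = [] := by
      apply List.filter_eq_nil_iff.mpr
      intro n hn
      simpa using List.any_eq_false.mp hbf n hn
    rw [hfil]
    simp [PySem.Set.ofList_nil, PySem.Set.len]
    left
    intro x hx
    simpa using List.any_eq_false.mp hbf x hx

theorem check_if_ok_eq_alt (ns ne : List String) : check_if_ok ns ne = check_if_ok_alt ns ne := by
  unfold check_if_ok check_if_ok_alt
  rw [goA_eq, goA_eq, bank_ok_eq, bank_ok_eq]
  cases (ns.any (fun h => PySem.Str.isIn "Husband" h)) <;>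
  cases (ns.any (fun w => PySem.Str.isIn "Wife" w && !(ns.any (fun h => PySem.Str.isIn "Husband" h && last_num h == last_num w)))) <;>
  simp

-- ===== VERDICT (by name: the statement is the Claim_ definition above) =====
theorem check_if_ok_spec : Claim_equal_check_if_ok := by
  intro ns ne _
  exact check_if_ok_eq_alt ns ne
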